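-- pv_equiv track=rewrite | github.com/LiFE-124C41/reach-conn-checker | reach_conn_checker/yaku_rules.py | _check_ryanpeiko
-- ===== SOURCE A (Python) =====
-- from collections import Counter
--
-- def _check_ryanpeiko(melds):
--     # Two SETS of identical sequences
--     # e.g. [1,2,3], [1,2,3], [5,6,7], [5,6,7]
--     seqs = []
--     for m_type, m_tiles in melds:
--         if m_type == 'shuntsu':
--             seqs.append(tuple(m_tiles))
--
--     if len(seqs) < 4:
--         return False
--
--     # Count frequency of each sequence
--     counts = Counter(seqs)
--     pairs_found = 0
--     for s, c in counts.items():
--         if c >= 2: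
--             pairs_found += (c // 2)
--
--     return pairs_found >= 2
-- ===== SOURCE B (Python) =====
-- def _check_ryanpeiko(melds):
--     # sort the sequences, then count duplicate pairs in one run-length scan
--     seqs = sorted(tuple(t) for mt, t in melds if mt == 'shuntsu')
--     pairs = 0
--     prev = None
--     run = 0
--     for s in seqs:
--         if s == prev:
--             run += 1
--         else:
--             pairs += run // 2
--             prev, run = s, 1
--     pairs += run // 2
--     return pairs >= 2
-- ===== Notes on version B (the rewrite author's own statement) =====
-- stated objective: alternative
-- what changed: Replaces the Counter-based frequency aggregation (and the redundant len<4 guard) with a sort of the sequence list followed by a single run-length scan that adds run//2 at each group boundary.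
import Mathlib
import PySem

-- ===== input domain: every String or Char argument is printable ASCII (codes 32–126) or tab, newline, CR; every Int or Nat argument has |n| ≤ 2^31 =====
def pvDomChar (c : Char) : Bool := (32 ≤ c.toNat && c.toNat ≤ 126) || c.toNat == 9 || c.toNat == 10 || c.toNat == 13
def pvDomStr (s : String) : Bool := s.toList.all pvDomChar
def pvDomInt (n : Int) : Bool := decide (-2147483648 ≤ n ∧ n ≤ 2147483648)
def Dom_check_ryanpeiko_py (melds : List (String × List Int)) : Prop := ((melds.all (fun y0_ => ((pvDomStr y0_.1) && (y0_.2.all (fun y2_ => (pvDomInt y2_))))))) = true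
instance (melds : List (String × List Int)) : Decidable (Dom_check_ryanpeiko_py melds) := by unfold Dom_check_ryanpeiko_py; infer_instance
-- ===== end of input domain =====

-- B replaces the Counter aggregation (and redundant len<4 guard) by a sort followed by a
-- single run-length scan; objective: alternative decomposition, same result.

-- ===== PORT A =====
def check_ryanpeiko_py (melds : List (String × List Int)) : Bool :=
  let seqs : List (List Int) :=
    melds.foldl (fun seqs m => if m.1 == "shuntsu" then seqs ++ [m.2] else seqs) []
  if seqs.length < 4 then false
  else
    let counts := PySem.Dict.counter seqs
    let pairs_found : Int :=
      counts.items.foldl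
        (fun pairs_found sc =>
          if 2 ≤ sc.2 then pairs_found + PySem.Int.floordiv sc.2 2 else pairs_found) 0
    decide (2 ≤ pairs_found)

-- ===== PORT B =====
-- the body of Source B's loop: state = (prev, run, pairs)
def pvStep (st : Option (List Int) × Int × Int) (s : List Int) : Option (List Int) × Int × Int :=
  if some s == st.1 then (st.1, st.2.1 + 1, st.2.2)
  else (some s, 1, st.2.2 + PySem.Int.floordiv st.2.1 2)

def check_ryanpeiko_py_alt (melds : List (String × List Int)) : Bool :=
  let seqs : List (List Int) :=
    PySem.List.sorted (melds.filterMap (fun m => if m.1 == "shuntsu" then some m.2 else none))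
      (fun x => x)
  let st := seqs.foldl pvStep (none, 0, 0)
  decide (2 ≤ st.2.2 + PySem.Int.floordiv st.2.1 2)

-- ===== PRECONDITION & SPEC =====
def Spec_check_ryanpeiko_py (melds : List (String × List Int)) (out : Bool) : Prop := out = check_ryanpeiko_py_alt melds
instance (melds : List (String × List Int)) (out : Bool) : Decidable (Spec_check_ryanpeiko_py melds out) := by unfold Spec_check_ryanpeiko_py; infer_instance

-- ===== CLAIM (what is proved, stated in full; the proofs are below) =====
def Claim_equal_check_ryanpeiko_py : Prop := ∀ (melds : List (String × List Int)), Dom_check_ryanpeiko_py melds → Spec_check_ryanpeiko_py melds (check_ryanpeiko_py melds)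

-- ===== LEMMAS AND PROOFS =====

-- number of identical pairs, as a sum over the distinct sequences
def pvPSum (xs : List (List Int)) : Int :=
  ((PySem.Set.ofList xs).map (fun k => (List.count k xs : Int) / 2)).sum

theorem pv_floordiv2 (a : Int) : PySem.Int.floordiv a 2 = a / 2 :=
  PySem.Int.floordiv_eq_ediv_of_pos (by norm_num)

-- A's accumulation loop builds the filtered list
theorem pv_seqs_foldl (l : List (String × List Int)) (acc : List (List Int)) :
    l.foldl (fun seqs m => if m.1 == "shuntsu" then seqs ++ [m.2] else seqs) acc
      = acc ++ l.filterMap (fun m => if m.1 == "shuntsu" then some m.2 else none) := by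
  induction l generalizing acc with
  | nil => simp
  | cons m t ih =>
    rw [List.foldl_cons, List.filterMap_cons]
    by_cases h : (m.1 == "shuntsu") = true
    · rw [if_pos h, ih, h]
      simp
    · rw [if_neg h, ih]
      simp [h]

-- A's Counter loop computes pvPSum
theorem pv_counter_fold (xs : List (List Int)) :
    ∀ (ks : List (List Int)) (init : Int), (∀ k ∈ ks, k ∈ xs) →
    ks.foldl (fun p k =>
        if (2:Int) ≤ (List.count k xs : Int) then p + PySem.Int.floordiv ((List.count k xs : Int)) 2
        else p) init
      = init + (ks.map (fun k => (List.count k xs : Int) / 2)).sum := by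
  intro ks
  induction ks with
  | nil => simp
  | cons k t ih =>
    intro init hmem
    have hk : k ∈ xs := hmem k (by simp)
    have hc : 1 ≤ List.count k xs := List.one_le_count_iff.mpr hk
    have ht : ∀ k ∈ t, k ∈ xs := fun k hk => hmem k (by simp [hk])
    by_cases h2 : (2:Int) ≤ (List.count k xs : Int)
    · simp only [List.foldl_cons, if_pos h2, pv_floordiv2, List.map_cons, List.sum_cons]
      simp only [pv_floordiv2] at ih
      rw [ih _ ht]
      ring
    · have hc1 : List.count k xs = 1 := by omega
      rw [List.foldl_cons, if_neg h2, ih _ ht]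
      simp only [List.map_cons, List.sum_cons, hc1]
      norm_num

-- distinct elements of x :: t, as a permutation
theorem pv_ofList_cons_perm (x : List Int) (t : List (List Int)) :
    (PySem.Set.ofList (x :: t)).Perm (x :: PySem.Set.ofList (t.filter (fun y => !(y == x)))) := by
  apply (List.perm_ext_iff_of_nodup (PySem.Set.nodup_ofList _) ?_).mpr
  · intro y
    simp [PySem.Set.mem_ofList, List.mem_filter]
    tauto
  · refine List.nodup_cons.mpr ⟨?_, PySem.Set.nodup_ofList _⟩
    intro hx
    have := (PySem.Set.mem_ofList _ _).mp hx
    simp [List.mem_filter] at this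

theorem pv_pSum_cons (x : List Int) (t : List (List Int)) :
    pvPSum (x :: t)
      = (List.count x (x :: t) : Int) / 2 + pvPSum (t.filter (fun y => !(y == x))) := by
  unfold pvPSum
  rw [((pv_ofList_cons_perm x t).map _).sum_eq]
  simp only [List.map_cons, List.sum_cons]
  congr 1
  apply congrArg List.sum
  apply List.map_congr_left
  intro k hk
  have hkx : ¬ k = x := by
    have := (PySem.Set.mem_ofList _ _).mp hk
    simp [List.mem_filter] at this
    exact this.2
  rw [List.count_filter (by simp [hkx])]
  have hxk : ¬ x = k := fun h => hkx h.symm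
  simp [hxk]

-- the run-length scan, from a mid-run state, on data whose head bounds the rest
theorem pv_scan_aux (l : List (List Int)) : ∀ (a : List Int) (r p : Int),
    (a :: l).Pairwise (· ≤ ·) →
    (l.foldl pvStep (some a, r, p)).2.2
        + PySem.Int.floordiv (l.foldl pvStep (some a, r, p)).2.1 2
      = p + (r + (List.count a l : Int)) / 2 + pvPSum (l.filter (fun y => !(y == a))) := by
  induction l with
  | nil =>
    intro a r p _
    simp [pvPSum]
  | cons x t ih =>
    intro a r p hpw
    by_cases hxa : x = a
    · subst hxa
      have hstep : pvStep (some x, r, p) x = (some x, r + 1, p) := by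
        simp [pvStep]
      have hpw' : (x :: t).Pairwise (· ≤ ·) := hpw.tail
      rw [List.foldl_cons, hstep, ih x (r + 1) p hpw']
      have hcount : List.count x (x :: t) = List.count x t + 1 := by
        simp
      rw [hcount]
      have hfil : (x :: t).filter (fun y => !(y == x)) = t.filter (fun y => !(y == x)) := by
        simp
      rw [hfil]
      push_cast
      ring_nf
    · have hax : a ≤ x := (List.pairwise_cons.mp hpw).1 x (by simp)
      have hpw' : (x :: t).Pairwise (· ≤ ·) := hpw.tail
      have hanotint : a ∉ t := by
        intro hat
        have hxa' : x ≤ a := (List.pairwise_cons.mp hpw').1 a hat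
        exact hxa (le_antisymm hxa' hax)
      have hstep : pvStep (some a, r, p) x = (some x, 1, p + PySem.Int.floordiv r 2) := by
        simp [pvStep, hxa]
      rw [List.foldl_cons, hstep, ih x 1 (p + PySem.Int.floordiv r 2) hpw']
      have hca : List.count a (x :: t) = 0 := by
        simp only [List.count_eq_zero, List.mem_cons, not_or]
        exact ⟨fun h => hxa h.symm, hanotint⟩
      have hfil : (x :: t).filter (fun y => !(y == a)) = x :: t := by
        rw [List.filter_cons]
        simp only [show (x == a) = false by simp [hxa], Bool.not_false, if_pos]
        rw [List.filter_eq_self.mpr]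
        intro y hy
        simp
        intro hya
        exact hanotint (hya ▸ hy)
      rw [hca, hfil, pv_pSum_cons]
      have hcx : (List.count x (x :: t) : Int) = 1 + (List.count x t : Int) := by
        simp
        ring
      rw [hcx, pv_floordiv2]
      push_cast
      ring_nf

-- the whole scan computes pvPSum on sorted input
theorem pv_scan_eq (l : List (List Int)) (hpw : l.Pairwise (· ≤ ·)) :
    (l.foldl pvStep (none, 0, 0)).2.2
        + PySem.Int.floordiv (l.foldl pvStep (none, 0, 0)).2.1 2
      = pvPSum l := by
  cases l with
  | nil => simp [pvPSum]
  | cons x t =>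
    have hstep : pvStep (none, 0, 0) x = (some x, 1, 0 + PySem.Int.floordiv 0 2) := by
      simp [pvStep]
    rw [List.foldl_cons, hstep, pv_scan_aux t x 1 (0 + PySem.Int.floordiv 0 2) hpw,
      pv_pSum_cons]
    have hcx : (List.count x (x :: t) : Int) = 1 + (List.count x t : Int) := by
      simp
      ring
    rw [hcx, pv_floordiv2]
    push_cast
    ring_nf

-- pvPSum only depends on the multiset of sequences
theorem pv_pSum_perm {l l' : List (List Int)} (h : l.Perm l') : pvPSum l = pvPSum l' := by
  unfold pvPSum
  have hperm : (PySem.Set.ofList l).Perm (PySem.Set.ofList l') := by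
    apply (List.perm_ext_iff_of_nodup (PySem.Set.nodup_ofList _) (PySem.Set.nodup_ofList _)).mpr
    intro y
    rw [PySem.Set.mem_ofList, PySem.Set.mem_ofList]
    exact ⟨fun hy => h.mem_iff.mp hy, fun hy => h.mem_iff.mpr hy⟩
  calc ((PySem.Set.ofList l).map (fun k => (List.count k l : Int) / 2)).sum
      = ((PySem.Set.ofList l).map (fun k => (List.count k l' : Int) / 2)).sum := by
        apply congrArg List.sum
        apply List.map_congr_left
        intro k _
        rw [h.count_eq]
    _ = ((PySem.Set.ofList l').map (fun k => (List.count k l' : Int) / 2)).sum :=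
        (hperm.map _).sum_eq

-- the distinct-element counts add up to the length
theorem pv_sum_counts (l : List (List Int)) :
    ((PySem.Set.ofList l).map (fun k => (List.count k l : Int))).sum = (l.length : Int) := by
  have hperm : (PySem.Set.ofList l).Perm l.dedup := by
    apply (List.perm_ext_iff_of_nodup (PySem.Set.nodup_ofList _) l.nodup_dedup).mpr
    intro y
    rw [PySem.Set.mem_ofList, List.mem_dedup]
  rw [(hperm.map _).sum_eq]
  have h := List.sum_map_count_dedup_eq_length l
  calc (l.dedup.map (fun k => (List.count k l : Int))).sum
      = (((l.dedup.map (fun k => List.count k l)).sum : Nat) : Int) := by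
        rw [Nat.cast_list_sum, List.map_map]
        rfl
    _ = (l.length : Int) := by
        rw [show (fun k : List Int => @List.count _ List.instBEq k l)
            = (fun k : List Int => @List.count _ instBEqOfDecidableEq k l) from
          funext fun k => by simp [List.count_eq_countP, beq_eq_decide]]
        exact_mod_cast h

-- twice the pair count is at most the number of sequences
theorem pv_pSum_bound (l : List (List Int)) : 2 * pvPSum l ≤ (l.length : Int) := by
  rw [← pv_sum_counts l]
  unfold pvPSum
  generalize PySem.Set.ofList l = ks
  induction ks with
  | nil => simp
  | cons k t ih =>
    simp only [List.map_cons, List.sum_cons]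
    have : 2 * ((List.count k l : Int) / 2) ≤ (List.count k l : Int) := by omega
    nlinarith [ih]

-- A's value, in closed form
theorem pv_A_eq (melds : List (String × List Int)) :
    check_ryanpeiko_py melds
      = (let seqs := melds.filterMap (fun m => if m.1 == "shuntsu" then some m.2 else none)
         if seqs.length < 4 then false else decide (2 ≤ pvPSum seqs)) := by
  unfold check_ryanpeiko_py
  rw [pv_seqs_foldl]
  simp only [List.nil_append]
  set seqs := melds.filterMap (fun m => if m.1 == "shuntsu" then some m.2 else none) with hseqs
  by_cases hlen : seqs.length < 4
  · simp [hlen]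
  · simp only [hlen, if_neg, not_false_iff]
    congr 1
    rw [PySem.Dict.items_counter, List.foldl_map,
      pv_counter_fold seqs (PySem.Set.ofList seqs) 0
        (fun k hk => (PySem.Set.mem_ofList _ _).mp hk)]
    simp [pvPSum]

-- PySem.List.sorted does not depend on the Decidable instance for < on List Int
theorem pv_sorted_inst (xs : List (List Int)) :
    @PySem.List.sorted (List Int) (List Int) List.instLT (fun a b => a.decidableLT b) xs
        (fun x => x) false
      = @PySem.List.sorted (List Int) (List Int) List.instLinearOrder.toLT
          LinearOrder.toDecidableLT xs (fun x => x) false := by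
  congr 1

-- B's value, in closed form
theorem pv_B_eq (melds : List (String × List Int)) :
    check_ryanpeiko_py_alt melds
      = decide (2 ≤ pvPSum (melds.filterMap (fun m => if m.1 == "shuntsu" then some m.2 else none))) := by
  unfold check_ryanpeiko_py_alt
  simp only []
  set seqs := melds.filterMap (fun m => if m.1 == "shuntsu" then some m.2 else none) with hseqs
  rw [pv_sorted_inst]
  have hpw : (@PySem.List.sorted (List Int) (List Int) List.instLinearOrder.toLT
      LinearOrder.toDecidableLT seqs (fun x => x) false).Pairwise (· ≤ ·) :=
    PySem.List.sorted_pairwise seqs (fun x => x)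
  rw [pv_scan_eq _ hpw,
    pv_pSum_perm (@PySem.List.sorted_perm (List Int) (List Int)
      List.instLinearOrder.toLT LinearOrder.toDecidableLT seqs (fun x => x) false)]

-- ===== VERDICT (by name: the statement is the Claim_ definition above) =====
theorem check_ryanpeiko_py_spec : Claim_equal_check_ryanpeiko_py := by
  intro melds _
  unfold Spec_check_ryanpeiko_py
  rw [pv_A_eq, pv_B_eq]
  set seqs := melds.filterMap (fun m => if m.1 == "shuntsu" then some m.2 else none) with hseqs
  by_cases hlen : seqs.length < 4
  · simp only [hlen, if_pos]
    have hb := pv_pSum_bound seqs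
    have : ¬ (2 ≤ pvPSum seqs) := by
      intro h2
      have : (4 : Int) ≤ (seqs.length : Int) := by nlinarith
      omega
    simp [this]
  · simp [hlen]
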